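-- pv_equiv track=rewrite | github.com/donanhnguyen/leetcode-problems | 2363-hash-python-easy.py | mergeSimilarItems
-- ===== SOURCE A (Python) =====
-- def mergeSimilarItems(items1, items2):
--     count = {}
--     for i, item in enumerate(items1):
--         if item[0] in count:
--             count[item[0]] += item[1]
--         else:
--             count[item[0]] = item[1]
--     for i, item in enumerate(items2):
--         if item[0] in count:
--             count[item[0]] += item[1]
--         else:
--             count[item[0]] = item[1]
--     sortedNums = dict(sorted(count.items()))
--     ret = []
--     for key in sortedNums:
--         ret.append(key)
--     rep = sorted(ret)
--     res = []
--     for i, num in enumerate(rep):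
--         res.append([num, count[num]])
--     return res
-- ===== SOURCE B (Python) =====
-- def mergeSimilarItems(items1, items2):
--     combined = sorted(items1 + items2, key=lambda it: it[0])
--     res = []
--     prev = None
--     total = 0
--     for it in combined:
--         if prev is None:
--             prev, total = it[0], it[1]
--         elif it[0] == prev:
--             total += it[1]
--         else:
--             res.append([prev, total])
--             prev, total = it[0], it[1]
--     if prev is not None:
--         res.append([prev, total])
--     return res
-- ===== Notes on version B (the rewrite author's own statement) =====
-- stated objective: simpler
-- what changed: Replaces A's dict aggregation followed by building, sorting (twice) and re-looking-up the key list with a single sort of the concatenated items by key plus one linear run-grouping pass that keeps no dict at all.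
import Mathlib
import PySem

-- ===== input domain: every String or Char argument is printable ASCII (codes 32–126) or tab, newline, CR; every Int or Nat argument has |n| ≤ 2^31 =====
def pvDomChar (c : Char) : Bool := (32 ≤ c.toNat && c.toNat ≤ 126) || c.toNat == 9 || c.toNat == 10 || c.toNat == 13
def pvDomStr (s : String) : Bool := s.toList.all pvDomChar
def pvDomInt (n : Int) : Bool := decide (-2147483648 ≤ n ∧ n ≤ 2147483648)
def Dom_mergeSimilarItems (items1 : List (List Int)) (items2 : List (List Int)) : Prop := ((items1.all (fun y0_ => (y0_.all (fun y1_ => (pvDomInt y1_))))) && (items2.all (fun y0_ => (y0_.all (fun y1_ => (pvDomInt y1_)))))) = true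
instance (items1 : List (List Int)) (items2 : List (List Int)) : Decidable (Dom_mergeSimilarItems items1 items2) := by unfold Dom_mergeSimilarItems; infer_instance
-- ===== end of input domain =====

-- B replaces A's dict-aggregate-then-sort-keys by concatenate + sort by key + one linear run-grouping pass (no dict); return-value equivalence only, neither version mutates its inputs.

-- ===== PORT A =====
-- item[0] / item[1]: total forms via getD 0; exact under Pre_ (every item has at least 2 entries)
def pvKey (it : List Int) : Int := (PySem.List.pyGet? it 0).getD 0
def pvVal (it : List Int) : Int := (PySem.List.pyGet? it 1).getD 0

-- loop body: 'if item[0] in count: count[item[0]] += item[1] else: count[item[0]] = item[1]'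
def aStep (d : PySem.Dict Int Int) (it : List Int) : PySem.Dict Int Int :=
  if d.contains (pvKey it) then d.insert (pvKey it) (d.getD (pvKey it) 0 + pvVal it)
  else d.insert (pvKey it) (pvVal it)

def mergeSimilarItems (items1 : List (List Int)) (items2 : List (List Int)) : List (List Int) :=
  let count := items2.foldl aStep (items1.foldl aStep PySem.Dict.empty)
  -- sorted(count.items()) — tuple comparison, fst then snd
  let sortedNums := PySem.List.sorted2 count.items Prod.fst Prod.snd false
  -- 'for key in sortedNums: ret.append(key)' over dict(sortedNums) (unique keys: insertion order = sortedNums order)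
  let ret := sortedNums.map Prod.fst
  let rep := PySem.List.sorted ret (fun x => x) false
  -- count[num]: num is always a present key, so getD is exact here
  rep.map (fun num => [num, count.getD num 0])

-- ===== PORT B =====
-- loop body of B: state = (res, prev/total as an Option, mirroring 'prev = None')
def bStep (st : List (List Int) × Option (Int × Int)) (it : List Int) :
    List (List Int) × Option (Int × Int) :=
  match st with
  | (res, none) => (res, some (pvKey it, pvVal it))
  | (res, some (p, t)) =>
    if pvKey it == p then (res, some (p, t + pvVal it))
    else (res ++ [[p, t]], some (pvKey it, pvVal it))

def mergeSimilarItems_alt (items1 : List (List Int)) (items2 : List (List Int)) : List (List Int) :=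
  let combined := PySem.List.sorted (items1 ++ items2) pvKey false
  let st := combined.foldl bStep ([], none)
  match st.2 with
  | none => st.1
  | some (p, t) => st.1 ++ [[p, t]]

-- ===== PRECONDITION & SPEC =====
-- Pre_ excludes exactly the inputs where the Python A raises IndexError: an item with fewer than 2 entries.
def Pre_mergeSimilarItems (items1 : List (List Int)) (items2 : List (List Int)) : Prop :=
  (∀ it ∈ items1, 2 ≤ it.length) ∧ (∀ it ∈ items2, 2 ≤ it.length)
instance (items1 : List (List Int)) (items2 : List (List Int)) : Decidable (Pre_mergeSimilarItems items1 items2) := by unfold Pre_mergeSimilarItems; infer_instance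

def pvWitness_mergeSimilarItems : List (List Int) × List (List Int) := ([[1, 2], [3, 4]], [[1, 5]])

def Spec_mergeSimilarItems (items1 : List (List Int)) (items2 : List (List Int)) (out : List (List Int)) : Prop := out = mergeSimilarItems_alt items1 items2
instance (items1 : List (List Int)) (items2 : List (List Int)) (out : List (List Int)) : Decidable (Spec_mergeSimilarItems items1 items2 out) := by unfold Spec_mergeSimilarItems; infer_instance

-- ===== CLAIM (what is proved, stated in full; the proofs are below) =====
def Claim_equal_mergeSimilarItems : Prop := ∀ (items1 : List (List Int)) (items2 : List (List Int)), Dom_mergeSimilarItems items1 items2 → Pre_mergeSimilarItems items1 items2 → Spec_mergeSimilarItems items1 items2 (mergeSimilarItems items1 items2)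

-- ===== LEMMAS AND PROOFS =====

def sumOf (L : List (List Int)) (c : Int) : Int :=
  ((L.filter (fun it => pvKey it == c)).map pvVal).sum

lemma sumOf_nil (c : Int) : sumOf [] c = 0 := rfl

lemma sumOf_cons (it : List Int) (L : List (List Int)) (c : Int) :
    sumOf (it :: L) c = (if pvKey it = c then pvVal it else 0) + sumOf L c := by
  by_cases h : pvKey it = c <;> simp [sumOf, h]

lemma sumOf_eq_zero {L : List (List Int)} {c : Int} (h : ∀ it ∈ L, pvKey it ≠ c) :
    sumOf L c = 0 := by
  have : L.filter (fun it => pvKey it == c) = [] := by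
    simp [List.filter_eq_nil_iff]; intro it hm; exact h it hm
  simp [sumOf, this]

lemma sumOf_perm {L L' : List (List Int)} (h : L.Perm L') (c : Int) :
    sumOf L c = sumOf L' c :=
  List.Perm.sum_eq ((h.filter _).map pvVal)

lemma aStep_eq_insert (d : PySem.Dict Int Int) (it : List Int) :
    aStep d it = d.insert (pvKey it)
      (if d.contains (pvKey it) then d.getD (pvKey it) 0 + pvVal it else pvVal it) := by
  unfold aStep; by_cases h : d.contains (pvKey it) <;> simp [h]

lemma getD_aStep (d : PySem.Dict Int Int) (it : List Int) (c : Int) :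
    (aStep d it).getD c 0 = d.getD c 0 + (if pvKey it = c then pvVal it else 0) := by
  unfold aStep
  by_cases hc : d.contains (pvKey it) = true
  · rw [if_pos hc, PySem.Dict.getD_insert]
    by_cases hk : c = pvKey it
    · rw [if_pos hk, if_pos hk.symm, hk]
    · rw [if_neg hk, if_neg (fun e => hk e.symm), add_zero]
  · rw [if_neg hc, PySem.Dict.getD_insert]
    by_cases hk : c = pvKey it
    · rw [if_pos hk, if_pos hk.symm]
      have h0 : d.getD c 0 = 0 := by
        rw [hk]; apply PySem.Dict.getD_of_not_contains; simpa using hc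
      rw [h0, zero_add]
    · rw [if_neg hk, if_neg (fun e => hk e.symm), add_zero]

lemma getD_foldl_aStep (l : List (List Int)) (d : PySem.Dict Int Int) (c : Int) :
    (l.foldl aStep d).getD c 0 = d.getD c 0 + sumOf l c := by
  induction l generalizing d with
  | nil => simp [sumOf_nil]
  | cons it l ih =>
    simp only [List.foldl_cons, ih, getD_aStep, sumOf_cons]; ring

lemma keys_foldl_aStep (l : List (List Int)) (d : PySem.Dict Int Int) :
    (l.foldl aStep d).keys = PySem.Set.update d.keys (l.map pvKey) := by
  have hstep : aStep = fun d it => d.insert (pvKey it)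
      (if d.contains (pvKey it) then d.getD (pvKey it) 0 + pvVal it else pvVal it) :=
    funext fun d => funext fun it => aStep_eq_insert d it
  rw [hstep]
  exact PySem.Dict.keys_foldl_insert_key l pvKey _ d

-- key list of a grouping run, and the grouping recursion itself
def gk (p : Int) : List (List Int) → List Int
  | [] => [p]
  | it :: rest => if pvKey it = p then gk p rest else p :: gk (pvKey it) rest

def groupRec (p t : Int) : List (List Int) → List (List Int)
  | [] => [[p, t]]
  | it :: rest =>
    if pvKey it = p then groupRec p (t + pvVal it) rest
    else [p, t] :: groupRec (pvKey it) (pvVal it) rest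

def pvFin (st : List (List Int) × Option (Int × Int)) : List (List Int) :=
  match st.2 with
  | none => st.1
  | some (p, t) => st.1 ++ [[p, t]]

lemma fold_some (L : List (List Int)) (res : List (List Int)) (p t : Int) :
    pvFin (L.foldl bStep (res, some (p, t))) = res ++ groupRec p t L := by
  induction L generalizing res p t with
  | nil => rfl
  | cons it L ih =>
    by_cases h : pvKey it = p
    · simp [bStep, h, ih, groupRec]
    · simp [bStep, h, ih, groupRec]

lemma mem_gk (L : List (List Int)) (p k : Int) :
    k ∈ gk p L ↔ k = p ∨ k ∈ L.map pvKey := by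
  induction L generalizing p with
  | nil => simp [gk]
  | cons it L ih =>
    by_cases h : pvKey it = p
    · rw [gk, if_pos h, ih]; simp [h]
    · rw [gk, if_neg h]; simp [ih]

lemma gk_pairwise (L : List (List Int)) (p : Int)
    (hs : L.Pairwise (fun a b => pvKey a ≤ pvKey b))
    (hlo : ∀ it ∈ L, p ≤ pvKey it) :
    (gk p L).Pairwise (· < ·) := by
  induction L generalizing p with
  | nil => simp [gk]
  | cons it L ih =>
    rw [List.pairwise_cons] at hs
    by_cases h : pvKey it = p
    · rw [gk, if_pos h]; exact ih p hs.2 (fun a ha => hlo a (List.mem_cons_of_mem _ ha))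
    · have hp : p < pvKey it :=
        lt_of_le_of_ne (hlo it (List.mem_cons_self)) (Ne.symm h)
      rw [gk, if_neg h, List.pairwise_cons]
      refine ⟨?_, ih (pvKey it) hs.2 hs.1⟩
      intro k hk
      rcases (mem_gk L (pvKey it) k).1 hk with rfl | hk'
      · exact hp
      · rcases List.mem_map.1 hk' with ⟨a, ha, rfl⟩
        exact lt_of_lt_of_le hp (hs.1 a ha)
    
lemma groupRec_eq (L : List (List Int)) (p t : Int)
    (hs : L.Pairwise (fun a b => pvKey a ≤ pvKey b))
    (hlo : ∀ it ∈ L, p ≤ pvKey it) :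
    groupRec p t L = (gk p L).map (fun k => [k, (if p = k then t else 0) + sumOf L k]) := by
  induction L generalizing p t with
  | nil => simp [groupRec, gk, sumOf_nil]
  | cons it L ih =>
    rw [List.pairwise_cons] at hs
    by_cases h : pvKey it = p
    · rw [groupRec, if_pos h, gk, if_pos h,
        ih p (t + pvVal it) hs.2 (fun a ha => hlo a (List.mem_cons_of_mem _ ha))]
      refine List.map_congr_left (fun k hk => ?_)
      rw [sumOf_cons, h]
      split_ifs with hpk <;> ring_nf
    · have hp : p < pvKey it :=
        lt_of_le_of_ne (hlo it List.mem_cons_self) (Ne.symm h)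
      rw [groupRec, if_neg h, gk, if_neg h,
        ih (pvKey it) (pvVal it) hs.2 hs.1, List.map_cons]
      congr 1
      · have hz : sumOf (it :: L) p = 0 := by
          apply sumOf_eq_zero
          intro a ha
          rcases List.mem_cons.mp ha with rfl | ha'
          · exact h
          · exact ne_of_gt (lt_of_lt_of_le hp (hs.1 a ha'))
        simp [hz]
      · refine List.map_congr_left (fun k hk => ?_)
        have hge : pvKey it ≤ k := by
          rcases (mem_gk L (pvKey it) k).1 hk with rfl | hk'
          · exact le_refl _
          · rcases List.mem_map.1 hk' with ⟨a, ha, rfl⟩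
            exact hs.1 a ha
        have hpk : p ≠ k := ne_of_lt (lt_of_lt_of_le hp hge)
        rw [sumOf_cons, if_neg hpk, zero_add]

lemma A_eq (i1 i2 : List (List Int)) :
    mergeSimilarItems i1 i2 =
      (PySem.List.sorted
        ((PySem.List.sorted2 (i2.foldl aStep (i1.foldl aStep PySem.Dict.empty)).items
            Prod.fst Prod.snd false).map Prod.fst) (fun x => x) false).map
        (fun num => [num, (i2.foldl aStep (i1.foldl aStep PySem.Dict.empty)).getD num 0]) := rfl

lemma B_eq (i1 i2 : List (List Int)) :
    mergeSimilarItems_alt i1 i2 =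
      pvFin ((PySem.List.sorted (i1 ++ i2) pvKey false).foldl bStep ([], none)) := rfl

-- ===== VERDICT (by name: the statement is the Claim_ definition above) =====
theorem mergeSimilarItems_spec : Claim_equal_mergeSimilarItems := by
  intro i1 i2 _ _
  show mergeSimilarItems i1 i2 = mergeSimilarItems_alt i1 i2
  by_cases hnil : i1 ++ i2 = []
  · rcases List.append_eq_nil_iff.mp hnil with ⟨h1, h2⟩
    subst h1; subst h2; rfl
  · obtain ⟨h, tail, hc⟩ : ∃ h tail, PySem.List.sorted (i1 ++ i2) pvKey false = h :: tail := by
      cases hcc : PySem.List.sorted (i1 ++ i2) pvKey false with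
      | nil => exact absurd ((PySem.List.sorted_eq_nil_iff _ _ _).mp hcc) hnil
      | cons a b => exact ⟨a, b, rfl⟩
    have hperm : (PySem.List.sorted (i1 ++ i2) pvKey false).Perm (i1 ++ i2) :=
      PySem.List.sorted_perm _ _ _
    have hpair : (PySem.List.sorted (i1 ++ i2) pvKey false).Pairwise
        (fun a b => pvKey a ≤ pvKey b) := PySem.List.sorted_pairwise _ _
    rw [hc] at hperm hpair
    rw [List.pairwise_cons] at hpair
    have hfold : i2.foldl aStep (i1.foldl aStep PySem.Dict.empty) =
        (i1 ++ i2).foldl aStep PySem.Dict.empty := (List.foldl_append).symm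
    set count := (i1 ++ i2).foldl aStep PySem.Dict.empty with hcount
    have hgetD : ∀ c, count.getD c 0 = sumOf (i1 ++ i2) c := by
      intro c; rw [hcount, getD_foldl_aStep, PySem.Dict.getD_empty, zero_add]
    have hkeys : count.keys = PySem.Set.ofList ((i1 ++ i2).map pvKey) := by
      rw [hcount, keys_foldl_aStep, PySem.Dict.keys_empty, PySem.Set.update_nil_left]
    set G := gk (pvKey h) tail with hG
    have hGpw : G.Pairwise (· < ·) := gk_pairwise tail (pvKey h) hpair.2 hpair.1
    have hGnd : G.Nodup := hGpw.nodup
    have hGmem : ∀ k, k ∈ G ↔ k ∈ (i1 ++ i2).map pvKey := by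
      intro k
      rw [hG, mem_gk]
      have h1 : (k = pvKey h ∨ k ∈ tail.map pvKey) ↔ k ∈ (h :: tail).map pvKey := by simp
      rw [h1]
      exact (hperm.map pvKey).mem_iff
    have hretperm : ((PySem.List.sorted2 count.items Prod.fst Prod.snd false).map
        Prod.fst).Perm count.keys := by
      have hp := (PySem.List.sorted2_perm (xs := count.items)
        (k1 := Prod.fst) (k2 := Prod.snd) (rev := false)).map Prod.fst
      simpa [PySem.Dict.keys] using hp
    have hGret : G.Perm ((PySem.List.sorted2 count.items Prod.fst Prod.snd false).map
        Prod.fst) := by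
      refine List.Perm.trans ?_ hretperm.symm
      rw [hkeys]
      refine (List.perm_ext_iff_of_nodup hGnd ?_).mpr ?_
      · exact PySem.Set.nodup_ofList _
      · intro a; rw [hGmem, PySem.Set.mem_ofList]
    have hrep : PySem.List.sorted
        ((PySem.List.sorted2 count.items Prod.fst Prod.snd false).map Prod.fst)
        (fun x => x) false = G :=
      PySem.List.sorted_eq_of_perm_of_pairwise_lt _ _ _ hGret hGpw
    rw [A_eq, B_eq, hc, List.foldl_cons, hfold, hrep]
    have hstep0 : bStep ([], none) h = ([], some (pvKey h, pvVal h)) := rfl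
    rw [hstep0, fold_some, List.nil_append,
      groupRec_eq tail (pvKey h) (pvVal h) hpair.2 hpair.1, ← hG]
    refine List.map_congr_left (fun k hk => ?_)
    have hsum : count.getD k 0 = (if pvKey h = k then pvVal h else 0) + sumOf tail k := by
      rw [hgetD, sumOf_perm hperm.symm, sumOf_cons]
    rw [hsum]
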